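-- pv_equiv track=rewrite | github.com/Swapnil05Rai/gfgpotd | ISBinary.py | isDivisible
-- ===== SOURCE A (Python) =====
-- def isDivisible(s):
--     odd, even, pos = 0, 0, 0
--     for i in s:
--         if i=="1":
--             if pos%2==0:odd+=1
--             else:even+=1
--         pos+=1
--     return 1 if not abs(odd-even)%3 else 0
-- ===== SOURCE B (Python) =====
-- def isDivisible(s):
--     odd = s[0::2].count("1")
--     even = s[1::2].count("1")
--     return 1 if abs(odd - even) % 3 == 0 else 0
-- ===== Notes on version B (the rewrite author's own statement) =====
-- stated objective: idiomatic
-- what changed: Replaces the single loop maintaining two counters and a position-parity counter by two strided slices s[0::2] / s[1::2] whose '1's are counted with str.count, then the same mod-3 test; the C-level slice+count passes beat the per-character Python loop by a constant factor.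
import Mathlib
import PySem

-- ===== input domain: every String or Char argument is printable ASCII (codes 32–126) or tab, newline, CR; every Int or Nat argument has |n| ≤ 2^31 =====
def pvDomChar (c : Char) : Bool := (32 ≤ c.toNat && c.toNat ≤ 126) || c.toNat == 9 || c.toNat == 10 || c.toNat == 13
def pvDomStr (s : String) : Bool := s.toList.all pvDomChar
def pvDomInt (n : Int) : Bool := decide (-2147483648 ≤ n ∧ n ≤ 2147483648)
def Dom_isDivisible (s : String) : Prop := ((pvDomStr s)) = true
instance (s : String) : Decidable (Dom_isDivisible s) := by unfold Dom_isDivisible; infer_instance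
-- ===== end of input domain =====

-- B replaces A's positional loop (two counters + a parity counter) by two strided slices
-- s[0::2] / s[1::2] counted with .count("1"), then the same mod-3 test (objective: more idiomatic).

-- ===== PORT A =====
def isDivisible (s : String) : Int :=
  let r := s.toList.foldl (fun (st : Int × Int × Int) i =>
    let odd := st.1; let even := st.2.1; let pos := st.2.2
    let oe := if i == '1' then
        (if PySem.Int.mod pos 2 == 0 then (odd + 1, even) else (odd, even + 1))
      else (odd, even)
    (oe.1, oe.2, pos + 1)) (0, 0, 0)
  if PySem.Int.mod (|r.1 - r.2.1|) 3 == 0 then 1 else 0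

-- ===== PORT B =====
def isDivisible_alt (s : String) : Int :=
  let odd : Int := ((PySem.List.slice? s.toList (some 0) none 2).getD []).count '1'
  let even : Int := ((PySem.List.slice? s.toList (some 1) none 2).getD []).count '1'
  if PySem.Int.mod (|odd - even|) 3 == 0 then 1 else 0

-- ===== PRECONDITION & SPEC =====
def Spec_isDivisible (s : String) (out : Int) : Prop := out = isDivisible_alt s
instance (s : String) (out : Int) : Decidable (Spec_isDivisible s out) := by unfold Spec_isDivisible; infer_instance

-- ===== CLAIM (what is proved, stated in full; the proofs are below) =====
def Claim_equal_isDivisible : Prop := ∀ (s : String), Dom_isDivisible s → Spec_isDivisible s (isDivisible s)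

-- ===== LEMMAS AND PROOFS =====

-- the elements at even indices (what Python's xs[0::2] selects)
def pvEvens {α : Type} : List α → List α
  | [] => []
  | [a] => [a]
  | a :: _ :: t => a :: pvEvens t

lemma pvEvens_cons {α : Type} (a : α) (t : List α) : pvEvens (a :: t) = a :: pvEvens t.tail := by
  cases t <;> simp [pvEvens]

lemma pvMod2 (a : Int) : PySem.Int.mod a 2 = a % 2 := by
  simp only [PySem.Int.mod]; rw [Int.fmod_eq_emod]; norm_num

lemma pvAux {α : Type} : ∀ (xs : List α),
    (List.range ((xs.length + 1) / 2)).filterMap (fun k => xs[2 * k]?) = pvEvens xs := by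
  intro xs
  induction xs using pvEvens.induct with
  | case1 => simp [pvEvens]
  | case2 a => simp [pvEvens]
  | case3 a b t ih =>
    have hlen : ((a :: b :: t).length + 1) / 2 = (t.length + 1) / 2 + 1 := by
      simp; omega
    rw [hlen, List.range_succ_eq_map, List.filterMap_cons]
    simp only [List.filterMap_map]
    have : ∀ k : ℕ, (a :: b :: t)[2 * (k + 1)]? = t[2 * k]? := by
      intro k
      have : 2 * (k + 1) = (2 * k) + 2 := by omega
      simp [this]
    simp only [Function.comp_def, Nat.succ_eq_add_one, this]
    simp [pvEvens, ih]

lemma pvSlice0 {α : Type} (xs : List α) :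
    PySem.List.slice? xs (some 0) none 2 = some (pvEvens xs) := by
  simp only [PySem.List.slice?, PySem.List.sliceIndices]
  norm_num
  have hcnt : (if 0 < xs.length then (((xs.length : Int) + 2 - 1) / 2).toNat else 0) = (xs.length + 1) / 2 := by
    split <;> omega
  have harg : (fun x : ℕ => xs[(2 * (x : Int)).toNat]?) = fun x => xs[2 * x]? := by
    funext x
    have : ((2 : Int) * (x : Int)).toNat = 2 * x := by omega
    rw [this]
  rw [hcnt, harg]
  exact pvAux xs

lemma pvSlice1 {α : Type} (xs : List α) :
    PySem.List.slice? xs (some 1) none 2 = some (pvEvens xs.tail) := by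
  cases xs with
  | nil => simp [PySem.List.slice?, PySem.List.sliceIndices, pvEvens]
  | cons a t =>
    simp only [PySem.List.slice?, PySem.List.sliceIndices]
    norm_num
    have hcnt : (if 0 < t.length then (((t.length : Int) + 2 - 1) / 2).toNat else 0) = (t.length + 1) / 2 := by
      split <;> omega
    have harg : (fun x : ℕ => (a :: t)[(1 + 2 * (x : Int)).toNat]?) = fun x => t[2 * x]? := by
      funext x
      have h2 : ((1 : Int) + 2 * (x : Int)).toNat = 2 * x + 1 := by omega
      rw [h2]
      simp [List.getElem?_cons_succ]
    rw [hcnt, harg]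
    exact pvAux t

-- A's loop computes the '1'-counts of the even- and odd-indexed subsequences
lemma pvFold (xs : List Char) : ∀ (o e p : Int),
    xs.foldl (fun (st : Int × Int × Int) i =>
      let odd := st.1; let even := st.2.1; let pos := st.2.2
      let oe := if i == '1' then
          (if PySem.Int.mod pos 2 == 0 then (odd + 1, even) else (odd, even + 1))
        else (odd, even)
      (oe.1, oe.2, pos + 1)) (o, e, p) =
    (if PySem.Int.mod p 2 == 0 then
      (o + ((pvEvens xs).count '1' : Int), e + ((pvEvens xs.tail).count '1' : Int), p + xs.length)
     else
      (o + ((pvEvens xs.tail).count '1' : Int), e + ((pvEvens xs).count '1' : Int), p + xs.length)) := by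
  induction xs with
  | nil => intro o e p; split <;> simp [pvEvens]
  | cons a t ih =>
    intro o e p
    simp only [List.foldl_cons]
    rw [ih _ _ (p+1)]
    by_cases hpm : p % 2 = 0
    · have h1 : (p+1) % 2 = 1 := by omega
      by_cases ha : a = '1' <;>
        simp [pvMod2, hpm, h1, pvEvens_cons, ha, List.count_cons] <;>
        push_cast <;> omega
    · have h0 : (p+1) % 2 = 0 := by omega
      have h1 : p % 2 = 1 := by omega
      by_cases ha : a = '1' <;>
        simp [pvMod2, h0, h1, pvEvens_cons, ha, List.count_cons] <;>
        push_cast <;> omega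

-- ===== VERDICT (by name: the statement is the Claim_ definition above) =====
theorem isDivisible_spec : Claim_equal_isDivisible := by
  intro s _
  unfold Spec_isDivisible isDivisible isDivisible_alt
  rw [pvFold s.toList 0 0 0, pvSlice0, pvSlice1]
  simp [PySem.Int.mod]
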